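-- pv_equiv track=rewrite | github.com/OhBaeWan/Miniature_Wargaming_Engine | Board.py | make_corner_terrain
-- ===== SOURCE A (Python) =====
-- def make_corner_terrain(width, height, corner):
--         terrain = [[True for i in range(width)] for j in range(height)]
--         if corner == "top left":
--             for i in range(width):
--                 for j in range(height):
--                     # if i or j are the max value set the tile to unwalkable
--                     if i == width - 1 or j == height - 1:
--                         terrain[j][i] = False
--         elif corner == "top right":
--             for i in range(width):
--                 for j in range(height):
--                     # if i is 0 and j is max set the tile to unwalkable
--                     if i == 0 or j == height - 1:
--                         terrain[j][i] = False
--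
--         elif corner == "bottom left":
--             for i in range(width):
--                 for j in range(height):
--
--                     # if i is max and j is 0 set the tile to unwalkable
--                     if i == width - 1 or j == 0:
--                         terrain[j][i] = False
--         elif corner == "bottom right":
--             for i in range(width):
--                 for j in range(height):
--                     # if i and j are 0 set the tile to unwalkable
--                     if i == 0 or j == 0:
--                         terrain[j][i] = False
--         return terrain
-- ===== SOURCE B (Python) =====
-- def make_corner_terrain(width, height, corner):
--     terrain = [[True] * width for _ in range(height)]
--     edge = None
--     if corner == "top left":
--         edge = (height - 1, width - 1)
--     elif corner == "top right":
--         edge = (height - 1, 0)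
--     elif corner == "bottom left":
--         edge = (0, width - 1)
--     elif corner == "bottom right":
--         edge = (0, 0)
--     if edge is not None:
--         row, col = edge
--         if height > 0:
--             terrain[row] = [False] * width
--         if width > 0:
--             for r in terrain:
--                 r[col] = False
--     return terrain
-- ===== Notes on version B (the rewrite author's own statement) =====
-- stated objective: simpler
-- what changed: A marks the blocked edge cells by scanning all width*height cells per corner with a nested loop; B maps the corner to the one blocked row index and one blocked column index and writes just that row and that column directly.
import Mathlib
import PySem

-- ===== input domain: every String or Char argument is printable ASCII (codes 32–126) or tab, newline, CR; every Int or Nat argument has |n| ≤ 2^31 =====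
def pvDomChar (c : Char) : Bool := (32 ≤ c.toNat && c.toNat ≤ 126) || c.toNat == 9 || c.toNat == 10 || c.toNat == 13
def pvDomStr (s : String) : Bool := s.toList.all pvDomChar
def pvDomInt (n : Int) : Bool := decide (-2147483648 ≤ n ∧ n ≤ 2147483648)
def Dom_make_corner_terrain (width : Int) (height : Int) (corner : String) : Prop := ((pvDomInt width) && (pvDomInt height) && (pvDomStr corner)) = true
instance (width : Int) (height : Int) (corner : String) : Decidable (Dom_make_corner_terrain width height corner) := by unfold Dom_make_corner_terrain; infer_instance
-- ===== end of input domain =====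

-- B replaces A's four full width×height scans by two targeted edge writes (one row, one column); objective: simpler.

-- ===== PORT A =====
def make_corner_terrain (width : Int) (height : Int) (corner : String) : List (List Bool) :=
  let terrain : List (List Bool) :=
    (PySem.List.pyRange 0 height 1).map (fun _ => (PySem.List.pyRange 0 width 1).map (fun _ => true))
  if corner = "top left" then
    (PySem.List.pyRange 0 width 1).foldl (fun t i =>
      (PySem.List.pyRange 0 height 1).foldl (fun t j =>
        if i = width - 1 ∨ j = height - 1 then
          PySem.List.pySetD t j (PySem.List.pySetD (PySem.List.pyGetD t j []) i false)
        else t) t) terrain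
  else if corner = "top right" then
    (PySem.List.pyRange 0 width 1).foldl (fun t i =>
      (PySem.List.pyRange 0 height 1).foldl (fun t j =>
        if i = 0 ∨ j = height - 1 then
          PySem.List.pySetD t j (PySem.List.pySetD (PySem.List.pyGetD t j []) i false)
        else t) t) terrain
  else if corner = "bottom left" then
    (PySem.List.pyRange 0 width 1).foldl (fun t i =>
      (PySem.List.pyRange 0 height 1).foldl (fun t j =>
        if i = width - 1 ∨ j = 0 then
          PySem.List.pySetD t j (PySem.List.pySetD (PySem.List.pyGetD t j []) i false)
        else t) t) terrain
  else if corner = "bottom right" then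
    (PySem.List.pyRange 0 width 1).foldl (fun t i =>
      (PySem.List.pyRange 0 height 1).foldl (fun t j =>
        if i = 0 ∨ j = 0 then
          PySem.List.pySetD t j (PySem.List.pySetD (PySem.List.pyGetD t j []) i false)
        else t) t) terrain
  else terrain

-- ===== PORT B =====
def make_corner_terrain_alt (width : Int) (height : Int) (corner : String) : List (List Bool) :=
  let terrain : List (List Bool) :=
    (PySem.List.pyRange 0 height 1).map (fun _ => List.replicate width.toNat true)
  let edge : Option (Int × Int) :=
    if corner = "top left" then some (height - 1, width - 1)
    else if corner = "top right" then some (height - 1, 0)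
    else if corner = "bottom left" then some (0, width - 1)
    else if corner = "bottom right" then some (0, 0)
    else none
  match edge with
  | none => terrain
  | some (row, col) =>
    let t1 := if 0 < height then terrain.set row.toNat (List.replicate width.toNat false) else terrain
    if 0 < width then t1.map (fun r => r.set col.toNat false) else t1

-- ===== PRECONDITION & SPEC =====
def Spec_make_corner_terrain (width : Int) (height : Int) (corner : String) (out : List (List Bool)) : Prop := out = make_corner_terrain_alt width height corner
instance (width : Int) (height : Int) (corner : String) (out : List (List Bool)) : Decidable (Spec_make_corner_terrain width height corner out) := by unfold Spec_make_corner_terrain; infer_instance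

-- ===== CLAIM (what is proved, stated in full; the proofs are below) =====
def Claim_equal_make_corner_terrain : Prop := ∀ (width : Int) (height : Int) (corner : String), Dom_make_corner_terrain width height corner → Spec_make_corner_terrain width height corner (make_corner_terrain width height corner)

-- ===== LEMMAS AND PROOFS =====

/-- Canonical grid: height `H` rows, width `W`, entry at column `i`, row `j` is `g i j`. -/
def mkGrid (W H : Nat) (g : Nat → Nat → Bool) : List (List Bool) :=
  (List.range H).map (fun j => (List.range W).map (fun i => g i j))

lemma mkGrid_congr (W H : Nat) {g g' : Nat → Nat → Bool}
    (h : ∀ i, i < W → ∀ j, j < H → g i j = g' i j) : mkGrid W H g = mkGrid W H g' := by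
  unfold mkGrid
  refine List.map_congr_left (fun j hj => ?_)
  refine List.map_congr_left (fun i hi => ?_)
  exact h i (List.mem_range.mp hi) j (List.mem_range.mp hj)

lemma getD_mkGrid (W H : Nat) (g : Nat → Nat → Bool) (j : Nat) (hj : j < H) :
    (mkGrid W H g).getD j [] = (List.range W).map (fun i => g i j) := by
  simp [mkGrid, List.getD_eq_getElem?_getD, hj]

lemma cell_set (W H : Nat) (g : Nat → Nat → Bool) (j i : Nat) (hj : j < H) :
    (mkGrid W H g).set j (((mkGrid W H g).getD j []).set i false)
      = mkGrid W H (fun i' j' => if j' = j ∧ i' = i then false else g i' j') := by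
  rw [getD_mkGrid W H g j hj]
  apply List.ext_getElem
  · simp [mkGrid]
  · intro j' h1 h2
    simp only [mkGrid, List.length_set, List.length_map, List.length_range] at h1
    simp only [mkGrid, List.getElem_set, List.getElem_map, List.getElem_range]
    by_cases hjj : j = j'
    · subst hjj
      apply List.ext_getElem
      · simp
      · intro i' _ _
        simp only [List.getElem_map, List.getElem_range]
        by_cases hii : i = i' <;> simp [hii, eq_comm]
    · simp only [if_neg hjj]
      refine List.map_congr_left (fun i' _ => ?_)
      have : ¬ (j' = j ∧ i' = i) := fun ⟨h, _⟩ => hjj h.symm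
      simp [this]

lemma inner_fold (width height : Int) (c : Int → Int → Prop) [inst : ∀ i j, Decidable (c i j)]
    (ni : Nat) (g : Nat → Nat → Bool) :
    ∀ (n : Nat), n ≤ height.toNat →
    (List.range n).foldl (fun t (j : Nat) =>
        if c (ni : Int) (j : Int) then
          PySem.List.pySetD t (j : Int) (PySem.List.pySetD (PySem.List.pyGetD t (j : Int) []) (ni : Int) false)
        else t)
      (mkGrid width.toNat height.toNat g)
    = mkGrid width.toNat height.toNat
        (fun i' j' => if i' = ni ∧ j' < n ∧ c (ni : Int) (j' : Int) then false else g i' j') := by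
  intro n
  induction n with
  | zero =>
    intro _
    refine (mkGrid_congr _ _ fun i' _ j' _ => ?_).symm
    simp
  | succ n ih =>
    intro hn
    rw [List.range_succ, List.foldl_append, ih (by omega), List.foldl_cons, List.foldl_nil]
    have hjH : n < height.toNat := by omega
    by_cases hc : c (ni : Int) (n : Int)
    · rw [if_pos hc]
      rw [PySem.List.pyGetD_natCast, PySem.List.pySetD_natCast, PySem.List.pySetD_natCast]
      rw [cell_set _ _ _ n ni hjH]
      refine mkGrid_congr _ _ fun i' _ j' _ => ?_
      split_ifs <;> simp_all <;> omega
    · rw [if_neg hc]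
      refine mkGrid_congr _ _ fun i' _ j' _ => ?_
      by_cases h2 : i' = ni
      · subst h2
        by_cases h1 : j' = n
        · subst h1; simp [hc]
        · have : (j' < n ∧ c (i' : Int) (j' : Int)) ↔ (j' < n + 1 ∧ c (i' : Int) (j' : Int)) := by
            constructor
            · rintro ⟨a, b⟩; exact ⟨by omega, b⟩
            · rintro ⟨a, b⟩; exact ⟨by omega, b⟩
          simp [this]
      · simp [h2]

lemma A_branch (width height : Int) (c : Int → Int → Prop) [inst : ∀ i j, Decidable (c i j)] :
    (PySem.List.pyRange 0 width 1).foldl (fun t i =>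
        (PySem.List.pyRange 0 height 1).foldl (fun t j =>
          if c i j then
            PySem.List.pySetD t j (PySem.List.pySetD (PySem.List.pyGetD t j []) i false)
          else t) t)
      ((PySem.List.pyRange 0 height 1).map (fun _ => (PySem.List.pyRange 0 width 1).map (fun _ => true)))
    = mkGrid width.toNat height.toNat (fun i j => !(decide (c (i : Int) (j : Int)))) := by
  have hinit : ((PySem.List.pyRange 0 height 1).map (fun _ => (PySem.List.pyRange 0 width 1).map (fun _ => true)) : List (List Bool))
      = mkGrid width.toNat height.toNat (fun _ _ => true) := by
    simp [PySem.List.pyRange_one, mkGrid, Function.comp_def]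
  rw [hinit]
  simp only [PySem.List.pyRange_one, sub_zero, List.foldl_map, zero_add]
  have key : ∀ (m : Nat), m ≤ width.toNat →
      (List.range m).foldl (fun t (i : Nat) =>
          (List.range height.toNat).foldl (fun t (j : Nat) =>
            if c (i : Int) (j : Int) then
              PySem.List.pySetD t (j : Int) (PySem.List.pySetD (PySem.List.pyGetD t (j : Int) []) (i : Int) false)
            else t) t)
        (mkGrid width.toNat height.toNat (fun _ _ => true))
      = mkGrid width.toNat height.toNat
          (fun i' j' => if i' < m ∧ c (i' : Int) (j' : Int) then false else true) := by
    intro m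
    induction m with
    | zero =>
      intro _
      refine (mkGrid_congr _ _ fun i' _ j' _ => ?_).symm
      simp
    | succ m ih =>
      intro hm
      rw [List.range_succ, List.foldl_append, ih (by omega), List.foldl_cons, List.foldl_nil]
      rw [inner_fold width height c m _ height.toNat (le_refl _)]
      refine mkGrid_congr _ _ fun i' hi' j' hj' => ?_
      by_cases h2 : i' = m
      · subst h2
        by_cases hcc : c (i' : Int) (j' : Int) <;> simp [hcc, hj'] <;> omega
      · have hni : ¬ (i' = m ∧ j' < height.toNat ∧ c (m : Int) (j' : Int)) := fun h => h2 h.1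
        rw [if_neg hni]
        by_cases hcc : c (i' : Int) (j' : Int)
        · simp [hcc]
          omega
        · simp [hcc]
  rw [key width.toNat (le_refl _)]
  refine mkGrid_congr _ _ fun i' hi' j' hj' => ?_
  by_cases hc : c (i' : Int) (j' : Int) <;> simp [hc, hi']

lemma B_branch (width height row col : Int)
    (hr : 0 < height → 0 ≤ row ∧ row < height) (hc : 0 < width → 0 ≤ col ∧ col < width) :
    (if 0 < width then
        (if 0 < height then
            ((PySem.List.pyRange 0 height 1).map (fun _ => List.replicate width.toNat true)).set row.toNat
              (List.replicate width.toNat false)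
          else (PySem.List.pyRange 0 height 1).map (fun _ => List.replicate width.toNat true)).map
          (fun r => r.set col.toNat false)
      else
        (if 0 < height then
            ((PySem.List.pyRange 0 height 1).map (fun _ => List.replicate width.toNat true)).set row.toNat
              (List.replicate width.toNat false)
          else (PySem.List.pyRange 0 height 1).map (fun _ => List.replicate width.toNat true)))
    = mkGrid width.toNat height.toNat
        (fun i j => !((decide ((j : Int) = row)) || decide ((i : Int) = col))) := by
  have hterr : ((PySem.List.pyRange 0 height 1).map (fun _ => List.replicate width.toNat true) : List (List Bool))
      = List.replicate height.toNat (List.replicate width.toNat true) := by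
    simp [PySem.List.pyRange_one, Function.comp_def]
  rw [hterr]
  by_cases hh : 0 < height
  · obtain ⟨hr0, hr1⟩ := hr hh
    simp only [if_pos hh]
    by_cases hw : 0 < width
    · obtain ⟨hc0, hc1⟩ := hc hw
      simp only [if_pos hw]
      apply List.ext_getElem
      · simp [mkGrid]
      · intro j h1 h2
        have hjH : j < height.toNat := by simpa using h1
        simp only [mkGrid, List.getElem_map, List.getElem_set, List.getElem_range,
          List.getElem_replicate]
        by_cases hrow : row.toNat = j
        · have hjr : (j : Int) = row := by omega
          simp only [if_pos hrow]
          apply List.ext_getElem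
          · simp
          · intro i h3 h4
            simp only [List.getElem_set, List.getElem_replicate, List.getElem_map,
              List.getElem_range, hjr]
            split_ifs <;> simp
        · have hjr : ¬ (j : Int) = row := by omega
          simp only [if_neg hrow]
          apply List.ext_getElem
          · simp
          · intro i h3 h4
            have h3' : i < width.toNat := by simpa using h3
            simp only [List.getElem_set, List.getElem_replicate, List.getElem_map,
              List.getElem_range]
            by_cases hcol : col.toNat = i
            · have hic : (i : Int) = col := by omega
              simp [hcol, hic, hjr]
            · have hic : ¬ (i : Int) = col := by omega
              simp [hcol, hic, hjr]
    · simp only [if_neg hw]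
      have hW0 : width.toNat = 0 := by omega
      apply List.ext_getElem
      · simp [mkGrid]
      · intro j h1 h2
        simp only [hW0, mkGrid, List.replicate_zero, List.getElem_set, List.getElem_replicate,
          List.getElem_map, List.range_zero, List.map_nil]
        split_ifs <;> rfl
  · have hH0 : height.toNat = 0 := by omega
    simp [hH0, mkGrid]

-- ===== VERDICT (by name: the statement is the Claim_ definition above) =====
theorem make_corner_terrain_spec : Claim_equal_make_corner_terrain := by
  intro width height corner _
  unfold Spec_make_corner_terrain make_corner_terrain make_corner_terrain_alt
  have hrTop : 0 < height → 0 ≤ height - 1 ∧ height - 1 < height := by intro h; omega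
  have hrBot : 0 < height → 0 ≤ (0 : Int) ∧ (0 : Int) < height := by intro h; omega
  have hcL : 0 < width → 0 ≤ width - 1 ∧ width - 1 < width := by intro h; omega
  have hcR : 0 < width → 0 ≤ (0 : Int) ∧ (0 : Int) < width := by intro h; omega
  by_cases e1 : corner = "top left"
  · simp only [if_pos e1]
    refine Eq.trans (A_branch width height (fun i j => i = width - 1 ∨ j = height - 1)) ?_
    refine Eq.trans (mkGrid_congr _ _ ?_) (B_branch width height (height - 1) (width - 1) hrTop hcL).symm
    intro i _ j _
    simp [Bool.or_comm]
  · simp only [if_neg e1]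
    by_cases e2 : corner = "top right"
    · simp only [if_pos e2]
      refine Eq.trans (A_branch width height (fun i j => i = 0 ∨ j = height - 1)) ?_
      refine Eq.trans (mkGrid_congr _ _ ?_) (B_branch width height (height - 1) 0 hrTop hcR).symm
      intro i _ j _
      simp [Bool.or_comm]
    · simp only [if_neg e2]
      by_cases e3 : corner = "bottom left"
      · simp only [if_pos e3]
        refine Eq.trans (A_branch width height (fun i j => i = width - 1 ∨ j = 0)) ?_
        refine Eq.trans (mkGrid_congr _ _ ?_) (B_branch width height 0 (width - 1) hrBot hcL).symm
        intro i _ j _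
        simp [Bool.or_comm]
      · simp only [if_neg e3]
        by_cases e4 : corner = "bottom right"
        · simp only [if_pos e4]
          refine Eq.trans (A_branch width height (fun i j => i = 0 ∨ j = 0)) ?_
          refine Eq.trans (mkGrid_congr _ _ ?_) (B_branch width height 0 0 hrBot hcR).symm
          intro i _ j _
          simp [Bool.or_comm]
        · simp only [if_neg e4]
          simp [PySem.List.pyRange_one, Function.comp_def]
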